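-- pv_equiv track=rewrite | github.com/shoei03/NIL | analysis/unique_clone_analyzer.py | split_csv_line
-- ===== SOURCE A (Python) =====
-- from typing import Dict, List, Tuple
--
-- def split_csv_line(line: str) -> List[str]:
--     """Split a CSV line, ignoring commas inside square brackets."""
--     result = []
--     current = []
--     bracket_depth = 0
--
--     for char in line:
--         if char == "[":
--             bracket_depth += 1
--             current.append(char)
--         elif char == "]":
--             bracket_depth -= 1
--             current.append(char)
--         elif char == "," and bracket_depth == 0:
--             # This comma is a column separator
--             result.append("".join(current))
--             current = []
--         else:
--             current.append(char)
--
--     # Add the last field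
--     if current:
--         result.append("".join(current))
--
--     return result
-- ===== SOURCE B (Python) =====
-- def split_csv_line(line: str):
--     """Split a CSV line, ignoring commas inside square brackets.
--
--     Two passes: first collect the indices of depth-0 commas, then build the
--     fields by slicing the line between consecutive cut points (no char buffer).
--     """
--     cuts = []
--     depth = 0
--     for i, ch in enumerate(line):
--         if ch == "[":
--             depth += 1
--         elif ch == "]":
--             depth -= 1
--         elif ch == "," and depth == 0:
--             cuts.append(i)
--     result = []
--     start = 0
--     for i in cuts:
--         result.append(line[start:i])
--         start = i + 1
--     tail = line[start:]
--     if tail: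
--         result.append(tail)
--     return result
-- ===== Notes on version B (the rewrite author's own statement) =====
-- stated objective: alternative
-- what changed: Replaces the character-buffer accumulation with a two-pass index approach: first pass records the indices of depth-0 commas, second pass builds each field by slicing the line between consecutive cut points (trailing slice appended only if non-empty).
import Mathlib
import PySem

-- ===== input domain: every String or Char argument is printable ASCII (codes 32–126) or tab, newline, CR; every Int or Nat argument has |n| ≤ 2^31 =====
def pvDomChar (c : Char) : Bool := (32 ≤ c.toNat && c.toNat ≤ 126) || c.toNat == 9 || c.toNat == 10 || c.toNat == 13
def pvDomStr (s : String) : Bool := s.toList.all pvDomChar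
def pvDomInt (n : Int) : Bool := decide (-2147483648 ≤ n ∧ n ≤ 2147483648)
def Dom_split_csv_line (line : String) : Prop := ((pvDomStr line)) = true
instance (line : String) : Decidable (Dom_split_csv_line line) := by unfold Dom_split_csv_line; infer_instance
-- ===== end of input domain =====

-- B replaces A's character-buffer accumulation with a two-pass cut-index/slice approach; same O(n) cost.

-- ===== PORT A =====
-- loop body of A: state = (result, current, bracket_depth)
def stepA (s : List String × List Char × Int) (c : Char) : List String × List Char × Int :=
  if c = '[' then (s.1, s.2.1 ++ [c], s.2.2 + 1)
  else if c = ']' then (s.1, s.2.1 ++ [c], s.2.2 - 1)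
  else if c = ',' ∧ s.2.2 = 0 then (s.1 ++ [String.ofList s.2.1], [], s.2.2)
  else (s.1, s.2.1 ++ [c], s.2.2)

def split_csv_line (line : String) : List String :=
  let st := line.toList.foldl stepA ([], [], 0)
  if st.2.1 ≠ [] then st.1 ++ [String.ofList st.2.1] else st.1

-- ===== PORT B =====
-- first pass: collect indices of depth-0 commas; state = (cuts, depth)
def stepB1 (s : List Int × Int) (p : Int × Char) : List Int × Int :=
  if p.2 = '[' then (s.1, s.2 + 1)
  else if p.2 = ']' then (s.1, s.2 - 1)
  else if p.2 = ',' ∧ s.2 = 0 then (s.1 ++ [p.1], s.2)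
  else s

-- second pass: slice between consecutive cuts; state = (result, start)
def stepB2 (cs : List Char) (s : List String × Int) (i : Int) : List String × Int :=
  (s.1 ++ [String.ofList (PySem.List.slice cs (some s.2) (some i))], i + 1)

def split_csv_line_alt (line : String) : List String :=
  let cs := line.toList
  let p1 := (PySem.List.enumerate cs 0).foldl stepB1 ([], 0)
  let p2 := p1.1.foldl (stepB2 cs) ([], 0)
  let tail := PySem.List.slice cs (some p2.2) none
  if tail ≠ [] then p2.1 ++ [String.ofList tail] else p2.1

-- ===== PRECONDITION & SPEC =====
def Spec_split_csv_line (line : String) (out : List String) : Prop := out = split_csv_line_alt line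
instance (line : String) (out : List String) : Decidable (Spec_split_csv_line line out) := by unfold Spec_split_csv_line; infer_instance

-- ===== CLAIM (what is proved, stated in full; the proofs are below) =====
def Claim_equal_split_csv_line : Prop := ∀ (line : String), Dom_split_csv_line line → Spec_split_csv_line line (split_csv_line line)

-- ===== LEMMAS AND PROOFS =====

-- depth update for a single character
def dstep (c : Char) (d : Int) : Int :=
  if c = '[' then d + 1 else if c = ']' then d - 1 else d

-- relative indices of depth-0 commas
def cutsR : List Char → Int → List Nat
  | [], _ => []
  | c :: t, d =>
    if c = ',' ∧ d = 0 then 0 :: (cutsR t d).map (· + 1)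
    else (cutsR t (dstep c d)).map (· + 1)

-- the fields determined by a cut list, starting at position `start`; the
-- trailing field is kept only if non-empty (A's and B's shared quirk)
def fieldsAll (cs : List Char) : Nat → List Nat → List (List Char)
  | start, [] => if cs.drop start = [] then [] else [cs.drop start]
  | start, i :: is => (cs.drop start).take (i - start) :: fieldsAll cs (i + 1) is

-- fields without the trailing piece (mirrors B's second foldl)
def fieldsOf (cs : List Char) : Nat → List Nat → List (List Char)
  | _, [] => []
  | start, i :: is => (cs.drop start).take (i - start) :: fieldsOf cs (i + 1) is

def lastStart : Nat → List Nat → Nat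
  | start, [] => start
  | _, i :: is => lastStart (i + 1) is

-- merge a pending buffer into the head field
def glue (cur : List Char) : List (List Char) → List (List Char)
  | [] => if cur = [] then [] else [cur]
  | f :: fs => (cur ++ f) :: fs

theorem glue_nil (fs : List (List Char)) : glue [] fs = fs := by
  cases fs <;> simp [glue]

theorem fieldsAll_shift (c : Char) (cs : List Char) (is : List Nat) :
    ∀ k, fieldsAll (c :: cs) (k + 1) (is.map (· + 1)) = fieldsAll cs k is := by
  induction is with
  | nil => intro k; simp [fieldsAll]
  | cons i is ih =>
    intro k
    simp only [List.map_cons, fieldsAll, List.drop_succ_cons]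
    have h : i + 1 - (k + 1) = i - k := by omega
    rw [h, ih (i + 1)]

theorem foldA_eq (t : List Char) : ∀ (cur : List Char) (d : Int) (res : List String),
    (let st := t.foldl stepA (res, cur, d);
     if st.2.1 ≠ [] then st.1 ++ [String.ofList st.2.1] else st.1)
    = res ++ (glue cur (fieldsAll t 0 (cutsR t d))).map String.ofList := by
  induction t with
  | nil =>
    intro cur d res
    simp only [List.foldl_nil, cutsR, fieldsAll, List.drop_nil]
    by_cases h : cur = [] <;> simp [h, glue]
  | cons c t ih =>
    intro cur d res
    by_cases hcomma : c = ',' ∧ d = 0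
    · obtain ⟨rfl, rfl⟩ := hcomma
      have hstep : stepA (res, cur, 0) ',' = (res ++ [String.ofList cur], [], 0) := by
        simp [stepA]
      simp only [List.foldl_cons, hstep]
      rw [ih [] 0 (res ++ [String.ofList cur])]
      have hcut : cutsR (',' :: t) 0 = 0 :: (cutsR t 0).map (· + 1) := by
        simp [cutsR]
      rw [hcut]
      simp only [fieldsAll, List.drop_zero, glue_nil]
      rw [fieldsAll_shift ',' t _ 0]
      simp [glue]
    · have hstep : stepA (res, cur, d) c = (res, cur ++ [c], dstep c d) := by
        by_cases h1 : c = '[' <;> by_cases h2 : c = ']' <;>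
          simp [stepA, dstep, h1, h2, hcomma]
      simp only [List.foldl_cons, hstep]
      rw [ih (cur ++ [c]) (dstep c d) res]
      congr 1
      simp only [cutsR, if_neg hcomma]
      cases hcut : cutsR t (dstep c d) with
      | nil =>
        simp only [List.map_nil, fieldsAll, List.drop_zero]
        cases t with
        | nil => simp [glue]
        | cons x xs => simp [glue]
      | cons i is =>
        simp only [List.map_cons, fieldsAll, List.drop_zero]
        rw [fieldsAll_shift c t is (i + 1)]
        simp only [glue]
        congr 2
        · simp only [Nat.sub_zero, List.take_succ_cons, List.append_assoc,
            List.singleton_append]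

theorem map_cast_shift (k : Int) (xs : List Nat) :
    (xs.map (· + 1)).map (fun n : Nat => k + (n : Int)) = xs.map (fun n : Nat => (k + 1) + (n : Int)) := by
  rw [List.map_map]
  apply List.map_congr_left
  intro n _
  simp only [Function.comp_apply]
  push_cast
  ring

theorem cutsB_eq (t : List Char) : ∀ (k : Int) (acc : List Int) (d : Int),
    ((PySem.List.enumerate t k).foldl stepB1 (acc, d)).1
    = acc ++ (cutsR t d).map (fun n : Nat => k + (n : Int)) := by
  induction t with
  | nil => intro k acc d; simp [PySem.List.enumerate_nil, cutsR]
  | cons c t ih =>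
    intro k acc d
    rw [PySem.List.enumerate_cons]
    by_cases hcomma : c = ',' ∧ d = 0
    · obtain ⟨rfl, rfl⟩ := hcomma
      have hstep : stepB1 (acc, 0) (k, ',') = (acc ++ [k], 0) := by
        simp [stepB1]
      simp only [List.foldl_cons, hstep]
      rw [ih (k + 1) (acc ++ [k]) 0]
      have hcut : cutsR (',' :: t) 0 = 0 :: (cutsR t 0).map (· + 1) := by
        simp [cutsR]
      rw [hcut]
      simp only [List.map_cons, ← map_cast_shift, Int.natCast_zero, add_zero,
        List.append_assoc, List.singleton_append]
    · have hstep : stepB1 (acc, d) (k, c) = (acc, dstep c d) := by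
        by_cases h1 : c = '[' <;> by_cases h2 : c = ']' <;>
          simp [stepB1, dstep, h1, h2, hcomma]
      simp only [List.foldl_cons, hstep]
      rw [ih (k + 1) acc (dstep c d)]
      simp only [cutsR, if_neg hcomma, ← map_cast_shift]

theorem foldB2_eq (cs : List Char) (is : List Nat) :
    ∀ (start : Nat) (acc : List String),
    (is.map (fun n : Nat => (n : Int))).foldl (stepB2 cs) (acc, (start : Int))
    = (acc ++ (fieldsOf cs start is).map String.ofList, ((lastStart start is : Nat) : Int)) := by
  induction is with
  | nil => intro start acc; simp [fieldsOf, lastStart]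
  | cons i is ih =>
    intro start acc
    simp only [List.map_cons, List.foldl_cons, stepB2]
    have : ((i : Int) + 1) = ((i + 1 : Nat) : Int) := by push_cast; ring
    rw [PySem.List.slice_natCast, this, ih (i + 1)]
    simp [fieldsOf, lastStart]

theorem fieldsAll_split (cs : List Char) (is : List Nat) : ∀ (start : Nat),
    fieldsAll cs start is
    = fieldsOf cs start is
      ++ (if cs.drop (lastStart start is) = [] then []
          else [cs.drop (lastStart start is)]) := by
  induction is with
  | nil => intro start; simp [fieldsAll, fieldsOf, lastStart]
  | cons i is ih => intro start; simp [fieldsAll, fieldsOf, lastStart, ih (i + 1)]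

theorem alt_eq_fieldsAll (line : String) :
    split_csv_line_alt line
    = (fieldsAll line.toList 0 (cutsR line.toList 0)).map String.ofList := by
  unfold split_csv_line_alt
  have h1 := cutsB_eq line.toList 0 [] 0
  simp only [zero_add] at h1
  simp only [h1, List.nil_append]
  have h2 := foldB2_eq line.toList (cutsR line.toList 0) 0 []
  simp only [Int.natCast_zero, List.nil_append] at h2
  simp only [h2]
  rw [PySem.List.slice_from_natCast]
  rw [fieldsAll_split line.toList (cutsR line.toList 0) 0]
  by_cases h : line.toList.drop (lastStart 0 (cutsR line.toList 0)) = [] <;>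
    simp [h]

-- ===== VERDICT (by name: the statement is the Claim_ definition above) =====
theorem split_csv_line_spec : Claim_equal_split_csv_line := by
  intro line _
  unfold Spec_split_csv_line
  rw [alt_eq_fieldsAll]
  have := foldA_eq line.toList [] 0 []
  simp only [List.nil_append, glue_nil] at this
  exact this.trans rfl
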